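-- pv_equiv track=rewrite | github.com/kika1s1/Codeforces-Contest-Solutions | Codeforces Round 943 (Div. 3)/F_Equal_XOR.py | is_interesting_subarray
-- ===== SOURCE A (Python) =====
-- def is_interesting_subarray(arr, l, r):
--     segment_xor = 0
--     for i in range(l, r):
--         segment_xor ^= arr[i]
--
--     if segment_xor == 0:
--         return "YES"
--
--     prefix_xor = 0
--     count_prefix = {}
--     for i in range(l, r):
--         prefix_xor ^= arr[i]
--         if prefix_xor == segment_xor:
--             if (i + 1) < r and segment_xor in count_prefix:
--                 return "YES"
--             count_prefix[prefix_xor] = 1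
--
--     return "NO"
-- ===== SOURCE B (Python) =====
-- def is_interesting_subarray(arr, l, r):
--     # Scan the segment right-to-left keeping the running suffix XOR; a prefix of
--     # the segment XORs to the whole segment exactly when the complementary
--     # suffix XORs to 0, so count zero suffix-XORs instead of matching prefixes.
--     s = 0
--     zeros = 0
--     for i in range(r - 1, l - 1, -1):
--         s ^= arr[i]
--         if s == 0:
--             zeros += 1
--     return "YES" if s == 0 or zeros >= 2 else "NO"
-- ===== Notes on version B (the rewrite author's own statement) =====
-- stated objective: simpler
-- what changed: A scans the segment forward twice, matching running prefix-XORs against the precomputed segment XOR with a dict-presence test and mid-loop early returns; B makes a single right-to-left pass counting positions where the running suffix-XOR is zero (using the identity prefix=S iff the complementary suffix XORs to 0), with no precomputed total, no dict and no early exit.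
import Mathlib
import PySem

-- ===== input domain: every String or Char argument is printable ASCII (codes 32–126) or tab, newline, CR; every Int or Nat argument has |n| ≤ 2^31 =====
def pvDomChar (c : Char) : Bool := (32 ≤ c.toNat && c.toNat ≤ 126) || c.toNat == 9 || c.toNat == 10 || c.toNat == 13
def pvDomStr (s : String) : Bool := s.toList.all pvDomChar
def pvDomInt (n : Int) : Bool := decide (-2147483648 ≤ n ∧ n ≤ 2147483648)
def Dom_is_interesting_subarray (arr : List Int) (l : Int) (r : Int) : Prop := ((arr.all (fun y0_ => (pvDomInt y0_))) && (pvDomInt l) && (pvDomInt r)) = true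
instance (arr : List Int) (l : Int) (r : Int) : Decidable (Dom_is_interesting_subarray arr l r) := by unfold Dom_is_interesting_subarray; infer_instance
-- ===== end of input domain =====

-- B replaces A's two forward passes (precomputed total, dict-presence test, early
-- returns) by a single right-to-left pass counting zero suffix-XORs (objective: simpler).

-- ===== PORT A =====
-- A's second loop: early return "YES", carrying prefix and the dict.
def pvALoop (arr : List Int) (r seg : Int) : List Int → Int → PySem.Dict Int Int → String
  | [], _, _ => "NO"
  | i :: is, p, d =>
    let p' := PySem.Int.bxor p (PySem.List.pyGetD arr i 0)
    if p' = seg then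
      if i + 1 < r ∧ d.contains seg then "YES"
      else pvALoop arr r seg is p' (d.insert p' 1)
    else pvALoop arr r seg is p' d

def is_interesting_subarray (arr : List Int) (l : Int) (r : Int) : String :=
  let seg := (PySem.List.pyRange l r 1).foldl
      (fun s i => PySem.Int.bxor s (PySem.List.pyGetD arr i 0)) 0
  if seg = 0 then "YES"
  else pvALoop arr r seg (PySem.List.pyRange l r 1) 0 PySem.Dict.empty

-- ===== PORT B =====
def is_interesting_subarray_alt (arr : List Int) (l : Int) (r : Int) : String :=
  let st := (PySem.List.pyRange (r - 1) (l - 1) (-1)).foldl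
      (fun (st : Int × Int) i =>
        let s := PySem.Int.bxor st.1 (PySem.List.pyGetD arr i 0)
        (s, if s = 0 then st.2 + 1 else st.2)) (0, 0)
  if st.1 = 0 ∨ 2 ≤ st.2 then "YES" else "NO"

-- ===== PRECONDITION & SPEC =====
-- Pre_ excludes exactly the inputs where Python's arr[i] raises IndexError:
-- a non-empty range l..r-1 containing an index outside [-len(arr), len(arr)).
def Pre_is_interesting_subarray (arr : List Int) (l : Int) (r : Int) : Prop :=
  r ≤ l ∨ (-(arr.length : Int) ≤ l ∧ r ≤ (arr.length : Int))
instance (arr : List Int) (l : Int) (r : Int) : Decidable (Pre_is_interesting_subarray arr l r) := by unfold Pre_is_interesting_subarray; infer_instance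

def pvWitness_is_interesting_subarray : List Int × Int × Int := ([1, 2, 3, 1, 2, 3], 0, 6)

def Spec_is_interesting_subarray (arr : List Int) (l : Int) (r : Int) (out : String) : Prop := out = is_interesting_subarray_alt arr l r
instance (arr : List Int) (l : Int) (r : Int) (out : String) : Decidable (Spec_is_interesting_subarray arr l r out) := by unfold Spec_is_interesting_subarray; infer_instance

-- ===== CLAIM (what is proved, stated in full; the proofs are below) =====
def Claim_equal_is_interesting_subarray : Prop := ∀ (arr : List Int) (l : Int) (r : Int), Dom_is_interesting_subarray arr l r → Pre_is_interesting_subarray arr l r → Spec_is_interesting_subarray arr l r (is_interesting_subarray arr l r)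

-- ===== LEMMAS AND PROOFS =====

-- PySem.Int.bxor is an exponent-2 abelian group operation: assoc + cancellation.
lemma pvBxor_assoc (a b c : Int) :
    PySem.Int.bxor (PySem.Int.bxor a b) c = PySem.Int.bxor a (PySem.Int.bxor b c) := by
  unfold PySem.Int.bxor
  by_cases ha : 0 ≤ a <;> by_cases hb : 0 ≤ b <;> by_cases hc : 0 ≤ c <;>
    simp [ha, hb, hc, Nat.xor_assoc] <;> omega

lemma pvBxor_zero_left (a : Int) : PySem.Int.bxor 0 a = a := by
  rw [PySem.Int.bxor_comm]; exact PySem.Int.bxor_zero a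

lemma pvBxor_cancel (s x : Int) : PySem.Int.bxor s (PySem.Int.bxor s x) = x := by
  rw [← pvBxor_assoc, PySem.Int.bxor_self, pvBxor_zero_left]

lemma pvBxor_inj (s : Int) : Function.Injective (PySem.Int.bxor s) := by
  intro x y h
  have := congrArg (PySem.Int.bxor s) h
  rwa [pvBxor_cancel, pvBxor_cancel] at this

-- Proof-side abbreviations: the running XOR and the running prefix-XOR list.
def pvXor (arr : List Int) : List Int → Int → Int
  | [], p => p
  | i :: is, p => pvXor arr is (PySem.Int.bxor p (PySem.List.pyGetD arr i 0))

def pvScan (arr : List Int) : List Int → Int → List Int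
  | [], _ => []
  | i :: is, p =>
    let p' := PySem.Int.bxor p (PySem.List.pyGetD arr i 0)
    p' :: pvScan arr is p'

-- the prefix-xor values of lengths 0 .. n-1 (the PROPER prefixes)
def pvPre (arr : List Int) : List Int → List Int
  | [] => []
  | i :: is => 0 :: (pvPre arr is).map (PySem.Int.bxor (PySem.List.pyGetD arr i 0))

-- number of prefixes along `is` (starting from p) equal to seg
def pvCnt (arr : List Int) (seg : Int) : List Int → Int → Nat
  | [], _ => 0
  | i :: is, p =>
    let p' := PySem.Int.bxor p (PySem.List.pyGetD arr i 0)
    (if p' = seg then 1 else 0) + pvCnt arr seg is p'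

lemma pvXor_eq_foldl (arr : List Int) (is : List Int) (p : Int) :
    (is.foldl (fun s i => PySem.Int.bxor s (PySem.List.pyGetD arr i 0)) p) = pvXor arr is p := by
  induction is generalizing p with
  | nil => rfl
  | cons i is ih => simp [List.foldl, pvXor, ih]

lemma pvXor_shift (arr : List Int) (is : List Int) (p q : Int) :
    pvXor arr is (PySem.Int.bxor p q) = PySem.Int.bxor p (pvXor arr is q) := by
  induction is generalizing q with
  | nil => rfl
  | cons i is ih => simp only [pvXor, pvBxor_assoc, ih]

lemma pvXor_append (arr : List Int) (xs ys : List Int) (p : Int) :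
    pvXor arr (xs ++ ys) p = pvXor arr ys (pvXor arr xs p) := by
  induction xs generalizing p with
  | nil => rfl
  | cons x xs ih => simp [pvXor, ih]

lemma pvXor_reverse (arr : List Int) (is : List Int) :
    pvXor arr is.reverse 0 = pvXor arr is 0 := by
  induction is with
  | nil => rfl
  | cons i is ih =>
    rw [List.reverse_cons, pvXor_append, ih]
    show pvXor arr [i] (pvXor arr is 0) = pvXor arr is (PySem.Int.bxor 0 (PySem.List.pyGetD arr i 0))
    rw [pvBxor_zero_left]
    show PySem.Int.bxor (pvXor arr is 0) (PySem.List.pyGetD arr i 0) = _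
    rw [show PySem.List.pyGetD arr i 0 = PySem.Int.bxor (PySem.List.pyGetD arr i 0) 0 from
          (PySem.Int.bxor_zero _).symm, pvXor_shift, PySem.Int.bxor_comm, PySem.Int.bxor_zero]

lemma pvScan_shift (arr : List Int) (is : List Int) (p q : Int) :
    pvScan arr is (PySem.Int.bxor p q) = (pvScan arr is q).map (PySem.Int.bxor p) := by
  induction is generalizing q with
  | nil => rfl
  | cons i is ih => simp only [pvScan, List.map_cons, pvBxor_assoc, ih]

lemma pvScan_append (arr : List Int) (xs ys : List Int) (p : Int) :
    pvScan arr (xs ++ ys) p = pvScan arr xs p ++ pvScan arr ys (pvXor arr xs p) := by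
  induction xs generalizing p with
  | nil => rfl
  | cons x xs ih => simp [pvScan, pvXor, ih]

lemma pvScan_count (arr : List Int) (seg : Int) (is : List Int) (p : Int) :
    PySem.List.count (pvScan arr is p) seg = pvCnt arr seg is p := by
  induction is generalizing p with
  | nil => simp [pvScan, pvCnt, PySem.List.count_eq]
  | cons i is ih =>
    simp only [pvScan, pvCnt, PySem.List.count_eq] at *
    rw [List.count_cons, ih]
    by_cases h : PySem.Int.bxor p (PySem.List.pyGetD arr i 0) = seg <;> simp [h] <;> omega

-- the reversed scan lists exactly the (segment-xor)-shifted proper prefixes, reversed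
lemma pvScan_reverse (arr : List Int) (is : List Int) :
    pvScan arr is.reverse 0 =
      ((pvPre arr is).map (PySem.Int.bxor (pvXor arr is 0))).reverse := by
  induction is with
  | nil => rfl
  | cons i is ih =>
    rw [List.reverse_cons, pvScan_append, ih, pvXor_reverse]
    show _ = ((pvPre arr (i :: is)).map _).reverse
    simp only [pvPre, List.map_cons, List.map_map, List.reverse_cons]
    have hX : pvXor arr (i :: is) 0 =
        PySem.Int.bxor (PySem.List.pyGetD arr i 0) (pvXor arr is 0) := by
      show pvXor arr is (PySem.Int.bxor 0 _) = _
      rw [pvBxor_zero_left, show PySem.List.pyGetD arr i 0 =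
        PySem.Int.bxor (PySem.List.pyGetD arr i 0) 0 from (PySem.Int.bxor_zero _).symm,
        pvXor_shift, PySem.Int.bxor_zero]
    congr 1
    · congr 1
      refine (List.map_congr_left fun x _ => ?_).symm
      show PySem.Int.bxor (pvXor arr (i :: is) 0) (PySem.Int.bxor (PySem.List.pyGetD arr i 0) x)
          = _
      rw [hX, PySem.Int.bxor_comm (PySem.List.pyGetD arr i 0) (pvXor arr is 0),
        pvBxor_assoc, pvBxor_cancel]
    · show pvScan arr [i] (pvXor arr is 0) = [PySem.Int.bxor (pvXor arr (i :: is) 0) 0]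
      rw [PySem.Int.bxor_zero, hX]
      show [PySem.Int.bxor (pvXor arr is 0) (PySem.List.pyGetD arr i 0)] = _
      rw [PySem.Int.bxor_comm]
  
-- proper prefixes of u ++ [z] = 0 followed by the full scan of u
lemma pvPre_concat (arr : List Int) (u : List Int) (z : Int) :
    pvPre arr (u ++ [z]) = 0 :: pvScan arr u 0 := by
  induction u with
  | nil => rfl
  | cons w u ih =>
    show 0 :: (pvPre arr (u ++ [z])).map _ = 0 :: pvScan arr (w :: u) 0
    rw [ih, List.map_cons, PySem.Int.bxor_zero, ← pvScan_shift]
    simp [pvScan, pvBxor_zero_left, PySem.Int.bxor_zero]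

-- B's fold: final suffix xor together with the number of zero running suffix-xors
lemma pvBfold (arr : List Int) (js : List Int) (s0 z0 : Int) :
    js.foldl (fun (st : Int × Int) i =>
        let s := PySem.Int.bxor st.1 (PySem.List.pyGetD arr i 0)
        (s, if s = 0 then st.2 + 1 else st.2)) (s0, z0) =
      (pvXor arr js s0, z0 + (PySem.List.count (pvScan arr js s0) 0 : Int)) := by
  induction js generalizing s0 z0 with
  | nil => simp [pvXor]
  | cons j js ih =>
    simp only [List.foldl, ih, pvXor, pvScan, PySem.List.count_eq, List.count_cons]
    by_cases h : PySem.Int.bxor s0 (PySem.List.pyGetD arr j 0) = 0 <;>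
      simp [h]; ring

-- characterisation of A's loop on a range split as ys ++ [z], z being the last index
lemma pvALoop_char (arr : List Int) (r seg : Int) (z : Int) (hz : ¬ z + 1 < r) :
    ∀ (ys : List Int) (p : Int) (d : PySem.Dict Int Int),
      (∀ y ∈ ys, y + 1 < r) →
      pvALoop arr r seg (ys ++ [z]) p d =
        if 2 ≤ pvCnt arr seg ys p + (if d.contains seg then 1 else 0) then "YES" else "NO" := by
  intro ys
  induction ys with
  | nil =>
    intro p d _
    have hr : ¬ (2 ≤ pvCnt arr seg [] p + (if d.contains seg then 1 else 0)) := by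
      simp only [pvCnt]; split_ifs <;> omega
    rw [if_neg hr]
    simp only [List.nil_append, pvALoop]
    by_cases h : PySem.Int.bxor p (PySem.List.pyGetD arr z 0) = seg
    · rw [if_pos h, if_neg (fun hcond => hz hcond.1)]
    · rw [if_neg h]
  | cons y ys ih =>
    intro p d hmem
    have hy : y + 1 < r := hmem y (by simp)
    have hmem' : ∀ a ∈ ys, a + 1 < r := fun a ha => hmem a (by simp [ha])
    simp only [List.cons_append, pvALoop]
    by_cases h : PySem.Int.bxor p (PySem.List.pyGetD arr y 0) = seg
    · rw [if_pos h]
      have hcnt : pvCnt arr seg (y :: ys) p = 1 + pvCnt arr seg ys seg := by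
        simp [pvCnt, h]
      by_cases hc : d.contains seg = true
      · rw [if_pos ⟨hy, hc⟩, if_pos hc, hcnt, if_pos (by omega)]
      · rw [if_neg (fun hcond => hc hcond.2)]
        rw [ih (PySem.Int.bxor p (PySem.List.pyGetD arr y 0))
              (d.insert (PySem.Int.bxor p (PySem.List.pyGetD arr y 0)) 1) hmem']
        rw [h]
        rw [if_pos (PySem.Dict.contains_insert_self d seg 1), if_neg hc, hcnt]
        split_ifs with h1 h2 <;> first | rfl | omega
    · rw [if_neg h]
      rw [ih (PySem.Int.bxor p (PySem.List.pyGetD arr y 0)) d hmem']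
      have hcnt : pvCnt arr seg (y :: ys) p = pvCnt arr seg ys (PySem.Int.bxor p (PySem.List.pyGetD arr y 0)) := by
        simp [pvCnt, h]
      rw [hcnt]

-- ===== VERDICT (by name: the statement is the Claim_ definition above) =====
theorem is_interesting_subarray_spec : Claim_equal_is_interesting_subarray := by
  intro arr l r _ _
  unfold Spec_is_interesting_subarray is_interesting_subarray is_interesting_subarray_alt
  rw [PySem.List.pyRange_neg_one_eq_reverse, show l - 1 + 1 = l by ring,
    show r - 1 + 1 = r by ring]
  by_cases hlr : r ≤ l
  · rw [PySem.List.pyRange_one_eq_nil hlr]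
    simp [pvXor]
  · rw [pvBfold, pvXor_eq_foldl, pvXor_reverse]
    set is := PySem.List.pyRange l r 1 with his
    set seg := pvXor arr is 0 with hseg
    by_cases h0 : seg = 0
    · simp [h0]
    · rw [if_neg h0]
      have hsplit : is = PySem.List.pyRange l (r - 1) 1 ++ [r - 1] := by
        have h := PySem.List.pyRange_one_succ_right (a := l) (b := r - 1) (by omega)
        rw [show r - 1 + 1 = r by ring] at h
        exact h
      -- B's side: zeros in the reversed scan = count of seg among the proper prefixes
      have hzeros : PySem.List.count (pvScan arr is.reverse 0) 0 =
          pvCnt arr seg (PySem.List.pyRange l (r - 1) 1) 0 := by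
        rw [pvScan_reverse, ← hseg, PySem.List.count_eq, List.count_reverse,
          show (0 : Int) = PySem.Int.bxor seg seg from (PySem.Int.bxor_self seg).symm,
          List.count_map_of_injective _ _ (pvBxor_inj seg),
          hsplit, pvPre_concat, List.count_cons, ← PySem.List.count_eq, pvScan_count]
        have : ¬ ((0 : Int) = seg) := fun h => h0 h.symm
        simp [this]
      rw [hzeros]
      -- A's side: count of seg among the proper-prefix scan
      rw [hsplit, pvALoop_char arr r seg (r - 1) (by omega) (PySem.List.pyRange l (r - 1) 1) 0
        PySem.Dict.empty
        (fun y hy => by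
          have := (PySem.List.mem_pyRange_one).mp hy
          omega)]
      simp only [PySem.Dict.contains_empty, Bool.false_eq_true, if_false, Nat.add_zero]
      rcases Nat.lt_or_ge (pvCnt arr seg (PySem.List.pyRange l (r - 1) 1) 0) 2 with hc | hc
      · rw [if_neg (by omega), if_neg]
        rintro (h | h)
        · exact h0 h
        · omega
      · rw [if_pos (by omega), if_pos (Or.inr (by omega))]
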